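-- pv_equiv track=rewrite | github.com/hyperpolymath/proven | bindings/micropython/proven.py | is_valid_header_name
-- ===== SOURCE A (Python) =====
-- def is_valid_header_name(name):
--     """Validate HTTP header name."""
--     if not name:
--         return False
--     for c in name:
--         if c in ' \t\r\n:':
--             return False
--         if ord(c) < 33 or ord(c) > 126:
--             return False
--     return True
-- ===== SOURCE B (Python) =====
-- import re
--
-- _HEADER_NAME_RE = re.compile(r'[!-9;-~]+')
--
-- def is_valid_header_name(name):
--     """Validate HTTP header name."""
--     return _HEADER_NAME_RE.fullmatch(name) is not None
-- ===== Notes on version B (the rewrite author's own statement) =====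
-- stated objective: idiomatic
-- what changed: Replaced the per-character loop with early returns by a single precompiled regex fullmatch against the class [!-9;-~]+ (printable ASCII minus ':', non-empty).
import Mathlib
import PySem

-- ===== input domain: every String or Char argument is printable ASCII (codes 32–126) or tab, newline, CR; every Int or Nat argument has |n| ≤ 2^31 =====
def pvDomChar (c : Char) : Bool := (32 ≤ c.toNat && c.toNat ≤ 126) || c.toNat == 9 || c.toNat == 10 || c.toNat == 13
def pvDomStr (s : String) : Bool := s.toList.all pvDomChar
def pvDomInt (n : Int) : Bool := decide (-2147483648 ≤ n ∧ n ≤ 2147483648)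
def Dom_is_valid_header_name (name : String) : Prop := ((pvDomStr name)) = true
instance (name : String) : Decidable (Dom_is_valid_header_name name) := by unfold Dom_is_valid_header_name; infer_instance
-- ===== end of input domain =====

-- B replaces A's per-character loop with a single regex fullmatch r'[!-9;-~]+' (idiomatic).
-- ===== PORT A =====
-- the 'for c in name' loop with early returns, as structural recursion over the characters
def pvLoopA : List Char → Bool
  | [] => true
  | c :: rest =>
    if c == ' ' || c == '\t' || c == '\r' || c == '\n' || c == ':' then false
    else if c.toNat < 33 || 126 < c.toNat then false
    else pvLoopA rest

def is_valid_header_name (name : String) : Bool :=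
  if name.toList.isEmpty then false else pvLoopA name.toList

-- ===== PORT B =====
-- fullmatch of the regex [!-9;-~]+ : every character in the class, and at least one character.
-- (the regex engine is ported by hand as the exact language it matches; this is exact)
def pvInClassB (c : Char) : Bool :=
  (33 ≤ c.toNat && c.toNat ≤ 57) || (59 ≤ c.toNat && c.toNat ≤ 126)

def is_valid_header_name_alt (name : String) : Bool :=
  !name.toList.isEmpty && name.toList.all pvInClassB

-- ===== PRECONDITION & SPEC =====
def Spec_is_valid_header_name (name : String) (out : Bool) : Prop := out = is_valid_header_name_alt name
instance (name : String) (out : Bool) : Decidable (Spec_is_valid_header_name name out) := by unfold Spec_is_valid_header_name; infer_instance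

-- ===== CLAIM (what is proved, stated in full; the proofs are below) =====
def Claim_equal_is_valid_header_name : Prop := ∀ (name : String), Dom_is_valid_header_name name → Spec_is_valid_header_name name (is_valid_header_name name)

-- ===== LEMMAS AND PROOFS =====

-- ===== VERDICT (by name: the statement is the Claim_ definition above) =====
lemma pvCharToNat_inj (c d : Char) : c = d ↔ c.toNat = d.toNat := by
  constructor
  · rintro rfl; rfl
  · intro h; exact Char.ext (UInt32.toNat_inj.mp h)

lemma pvStep (c : Char) :
    (if c == ' ' || c == '\t' || c == '\r' || c == '\n' || c == ':' then false
     else if c.toNat < 33 || 126 < c.toNat then false else true) = pvInClassB c := by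
  simp only [pvInClassB]
  split_ifs with h1 h2
  · simp only [Bool.or_eq_true, beq_iff_eq, pvCharToNat_inj] at h1
    simp only [show (' ').toNat = 32 from rfl, show ('\t').toNat = 9 from rfl,
      show ('\r').toNat = 13 from rfl, show ('\n').toNat = 10 from rfl,
      show (':').toNat = 58 from rfl] at h1
    symm
    simp only [Bool.or_eq_false_iff, Bool.and_eq_false_iff, decide_eq_false_iff_not, not_le]
    omega
  · simp only [Bool.or_eq_true, decide_eq_true_eq] at h2
    symm
    simp only [Bool.or_eq_false_iff, Bool.and_eq_false_iff, decide_eq_false_iff_not, not_le]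
    omega
  · simp only [Bool.or_eq_true, beq_iff_eq, pvCharToNat_inj, not_or] at h1
    simp only [show (' ').toNat = 32 from rfl, show ('\t').toNat = 9 from rfl,
      show ('\r').toNat = 13 from rfl, show ('\n').toNat = 10 from rfl,
      show (':').toNat = 58 from rfl] at h1
    simp only [Bool.or_eq_true, decide_eq_true_eq, not_or, not_lt] at h2
    symm
    simp only [Bool.or_eq_true, Bool.and_eq_true, decide_eq_true_eq]
    omega

lemma pvLoopA_eq_all (l : List Char) : pvLoopA l = l.all pvInClassB := by
  induction l with
  | nil => rfl
  | cons c rest ih =>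
    simp only [pvLoopA, List.all_cons, ih, ← pvStep c]
    split_ifs <;> simp

theorem is_valid_header_name_spec : Claim_equal_is_valid_header_name := by
  intro name _
  unfold Spec_is_valid_header_name is_valid_header_name is_valid_header_name_alt
  rw [pvLoopA_eq_all]
  cases name.toList <;> simp
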